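-- pv_equiv track=rewrite | github.com/pytek-io/render | render/utils.py | identify_browser
-- ===== SOURCE A (Python) =====
-- def identify_browser(browser: str):
--     elements = browser.split(" ")
--     result = next((element.split("/") for element in elements if element.startswith("Edg/")), None)
--     if result is None:
--         result = next(
--             (element.split("/") for element in elements if element.startswith("Firefox/")),
--             None,
--         )
--     if result is None:
--         result = next(
--             (element.split("/") for element in elements if element.startswith("Chrome/")),
--             None,
--         )
--     if result is None:
--         result = next(
--             (element.split("/") for element in elements if element.startswith("Version/")),
--             None,
--         )
--         if result:
--             result = "Safari", result[1]
--     if result: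
--         browser, version = result
--         return browser, int(version.split(".")[0])
--     else:
--         return None, None
-- ===== SOURCE B (Python) =====
-- def identify_browser(browser: str):
--     index = {}
--     for token in browser.split(" "):
--         for prefix in ("Edg/", "Firefox/", "Chrome/", "Version/"):
--             if prefix not in index and token.startswith(prefix):
--                 index[prefix] = token
--     for prefix in ("Edg/", "Firefox/", "Chrome/", "Version/"):
--         if prefix in index:
--             token = index[prefix]
--             if prefix == "Version/":
--                 name, version = "Safari", token.split("/")[1]
--             else:
--                 name, version = token.split("/")
--             return name, int(version.split(".")[0])
--     return None, None
-- ===== Notes on version B (the rewrite author's own statement) =====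
-- stated objective: alternative
-- what changed: A makes up to four separate scans of the token list (one next(...) per browser prefix); B makes ONE pass building a first-occurrence dict keyed by recognized prefix and then resolves the priority list against that index, splitting/unpacking only the winning token.
import Mathlib
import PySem

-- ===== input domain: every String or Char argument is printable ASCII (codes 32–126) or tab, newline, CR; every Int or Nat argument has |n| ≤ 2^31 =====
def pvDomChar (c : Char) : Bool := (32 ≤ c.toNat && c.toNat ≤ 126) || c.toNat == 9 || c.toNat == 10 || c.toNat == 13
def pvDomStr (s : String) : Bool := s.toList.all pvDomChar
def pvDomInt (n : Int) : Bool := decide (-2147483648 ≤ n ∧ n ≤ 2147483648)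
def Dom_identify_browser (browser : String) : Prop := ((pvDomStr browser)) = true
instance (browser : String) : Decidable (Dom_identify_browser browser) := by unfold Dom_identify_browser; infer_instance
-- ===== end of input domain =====

-- B replaces A's four scans of the token list by one indexing pass plus a priority lookup; same results.

-- s.split(sep) for a nonempty sep (every use below has sep " ", "/" or "."): split? is `some` there, exact
def pvSplit (s sep : String) : List String := (PySem.Str.split? s sep).getD []

-- ===== PORT A =====
-- return name, int(version.split(".")[0]); the `| none` arm is Python's ValueError (int() fails), excluded by Pre_
def pvFinishA (name version : String) : Option String × Option Int :=
  match PySem.Int.ofStr? ((pvSplit version ".").headD "") with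
  | some n => (some name, some n)
  | none => (none, none)

-- `browser, version = result`; the catch-all arm is Python's unpack ValueError (len ≠ 2), excluded by Pre_
def pvUnpackA (l : List String) : Option String × Option Int :=
  match l with
  | [name, version] => pvFinishA name version
  | _ => (none, none)

-- A's chain of next(...) generators, each 'result is None' fall-through inlined as a match arm.
-- In the Version/ branch result[1] is `(pvSplit e "/").getD 1 ""`: the token contains '/', so index 1 always exists (exact).
def identify_browser (browser : String) : Option String × Option Int :=
  let elements := pvSplit browser " "
  match elements.find? (fun e => PySem.Str.startswith e "Edg/") with
  | some e => pvUnpackA (pvSplit e "/")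
  | none =>
    match elements.find? (fun e => PySem.Str.startswith e "Firefox/") with
    | some e => pvUnpackA (pvSplit e "/")
    | none =>
      match elements.find? (fun e => PySem.Str.startswith e "Chrome/") with
      | some e => pvUnpackA (pvSplit e "/")
      | none =>
        match elements.find? (fun e => PySem.Str.startswith e "Version/") with
        | some e => pvFinishA "Safari" ((pvSplit e "/").getD 1 "")
        | none => (none, none)

-- ===== PORT B =====
def pvPrefixes : List String := ["Edg/", "Firefox/", "Chrome/", "Version/"]

-- body of B's indexing pass: for each prefix, store the token if the key is absent
def pvStepB (d : PySem.Dict String String) (token : String) : PySem.Dict String String :=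
  pvPrefixes.foldl
    (fun d p => if !(d.contains p) && PySem.Str.startswith token p then d.insert p token else d) d

-- return name, int(version.split(".")[0]); `| none` = Python's int() ValueError, excluded by Pre_
def pvFinishB (name version : String) : Option String × Option Int :=
  match PySem.Int.ofStr? ((pvSplit version ".").headD "") with
  | some n => (some name, some n)
  | none => (none, none)

-- B's second loop: first prefix present in the index wins; catch-all = unpack ValueError, excluded by Pre_
def pvPickB (index : PySem.Dict String String) : List String → Option String × Option Int
  | [] => (none, none)
  | p :: rest =>
    match index.get? p with
    | some token =>
      if p == "Version/" then
        pvFinishB "Safari" ((pvSplit token "/").getD 1 "")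
      else
        match pvSplit token "/" with
        | [name, version] => pvFinishB name version
        | _ => (none, none)
    | none => pvPickB index rest

def identify_browser_alt (browser : String) : Option String × Option Int :=
  let index := (pvSplit browser " ").foldl pvStepB PySem.Dict.empty
  pvPickB index pvPrefixes

-- ===== PRECONDITION & SPEC =====
-- the token (and its browser-prefix) A's priority chain selects, if any
def pvSelect (elements : List String) : Option (String × String) :=
  match elements.find? (fun e => PySem.Str.startswith e "Edg/") with
  | some t => some ("Edg/", t)
  | none =>
    match elements.find? (fun e => PySem.Str.startswith e "Firefox/") with
    | some t => some ("Firefox/", t)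
    | none =>
      match elements.find? (fun e => PySem.Str.startswith e "Chrome/") with
      | some t => some ("Chrome/", t)
      | none =>
        match elements.find? (fun e => PySem.Str.startswith e "Version/") with
        | some t => some ("Version/", t)
        | none => none

def pvPreB (browser : String) : Bool :=
  match pvSelect (pvSplit browser " ") with
  | none => true
  | some (p, t) =>
    let parts := pvSplit t "/"
    (p == "Version/" || parts.length == 2) &&
    (PySem.Int.ofStr? ((pvSplit (parts.getD 1 "") ".").headD "")).isSome

-- Pre_ excludes exactly the inputs on which the Python raises ValueError: the selected winning token
-- either has ≠ 2 slash-separated parts (tuple-unpack fails, non-Version branches) or a non-integer major version.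
def Pre_identify_browser (browser : String) : Prop := pvPreB browser = true
instance (browser : String) : Decidable (Pre_identify_browser browser) := by unfold Pre_identify_browser; infer_instance

def pvWitness_identify_browser : String := "Mozilla/5.0 Chrome/103.0.0.0 Safari/537.36"

def Spec_identify_browser (browser : String) (out : Option String × Option Int) : Prop := out = identify_browser_alt browser
instance (browser : String) (out : Option String × Option Int) : Decidable (Spec_identify_browser browser out) := by unfold Spec_identify_browser; infer_instance

-- ===== CLAIM (what is proved, stated in full; the proofs are below) =====
def Claim_equal_identify_browser : Prop := ∀ (browser : String), Dom_identify_browser browser → Pre_identify_browser browser → Spec_identify_browser browser (identify_browser browser)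

-- ===== LEMMAS AND PROOFS =====

-- a fold step over prefixes not containing p leaves the lookup at p unchanged
theorem pvInner_notmem (ps : List String) (d : PySem.Dict String String) (token p : String)
    (hp : p ∉ ps) :
    ((ps.foldl (fun d q => if !(d.contains q) && PySem.Str.startswith token q then d.insert q token else d) d).get? p)
      = d.get? p := by
  induction ps generalizing d with
  | nil => rfl
  | cons q qs ih =>
    simp only [List.foldl_cons]
    rw [ih _ (by simp_all)]
    have hne : p ≠ q := by simp_all
    split
    · rw [PySem.Dict.get?_insert]; simp [hne]
    · rfl

theorem pvInner_mem (ps : List String) (d : PySem.Dict String String) (token p : String)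
    (hp : p ∈ ps) (hnd : ps.Nodup) :
    ((ps.foldl (fun d q => if !(d.contains q) && PySem.Str.startswith token q then d.insert q token else d) d).get? p)
      = if (d.get? p).isSome then d.get? p
        else if PySem.Str.startswith token p then some token else d.get? p := by
  induction ps generalizing d with
  | nil => cases hp
  | cons q qs ih =>
    simp only [List.foldl_cons]
    rcases List.mem_cons.mp hp with rfl | hmem
    · rw [pvInner_notmem qs _ token p (List.nodup_cons.mp hnd).1]
      rw [PySem.Dict.contains_eq_isSome_get?]
      by_cases h : (d.get? p).isSome
      · simp [h]
      · by_cases hs : PySem.Chars.startswith token.toList p.toList = true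
        · simp [h, hs, PySem.Dict.get?_insert_self]
        · simp [h, hs]
    · have hne : p ≠ q := by
        rintro rfl; exact (List.nodup_cons.mp hnd).1 hmem
      have hstep : ((if !(d.contains q) && PySem.Str.startswith token q then d.insert q token else d).get? p) = d.get? p := by
        split
        · rw [PySem.Dict.get?_insert]; simp [hne]
        · rfl
      rw [ih _ hmem (List.nodup_cons.mp hnd).2, hstep]

-- the index built by B's single pass answers exactly A's "first token with this prefix" scan
theorem pvIndex_get (elements : List String) (d : PySem.Dict String String) (p : String)
    (hp : p ∈ pvPrefixes) :
    ((elements.foldl pvStepB d).get? p)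
      = (d.get? p).or (elements.find? (fun e => PySem.Str.startswith e p)) := by
  induction elements generalizing d with
  | nil => simp
  | cons e es ih =>
    simp only [List.foldl_cons]
    rw [ih (pvStepB d e)]
    have hnd : pvPrefixes.Nodup := by decide
    rw [pvStepB, pvInner_mem pvPrefixes d e p hp hnd]
    by_cases h : (d.get? p).isSome
    · rcases Option.isSome_iff_exists.mp h with ⟨v, hv⟩
      simp [hv]
    · have hnone : d.get? p = none := Option.not_isSome_iff_eq_none.mp h
      by_cases hs : PySem.Chars.startswith e.toList p.toList = true
      · simp [hnone, hs]
      · simp [hnone, hs]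

-- the two finishers are the same function
theorem pvAB : pvFinishB = pvFinishA := rfl

set_option maxHeartbeats 1000000 in
theorem pv_ports_eq (browser : String) : identify_browser browser = identify_browser_alt browser := by
  unfold identify_browser identify_browser_alt
  have hE := pvIndex_get (pvSplit browser " ") PySem.Dict.empty "Edg/" (by decide)
  have hF := pvIndex_get (pvSplit browser " ") PySem.Dict.empty "Firefox/" (by decide)
  have hC := pvIndex_get (pvSplit browser " ") PySem.Dict.empty "Chrome/" (by decide)
  have hV := pvIndex_get (pvSplit browser " ") PySem.Dict.empty "Version/" (by decide)
  simp only [PySem.Dict.get?_empty, Option.none_or] at hE hF hC hV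
  simp only [pvPrefixes, pvPickB, hE, hF, hC, hV, pvAB]
  cases (pvSplit browser " ").find? (fun e => PySem.Str.startswith e "Edg/") with
  | some e =>
    simp only [show (("Edg/" : String) == "Version/") = false from by decide, Bool.false_eq_true, if_false]
    cases pvSplit e "/" with
    | nil => rfl
    | cons n rest =>
      cases rest with
      | nil => rfl
      | cons v rest2 =>
        cases rest2 with
        | nil => rfl
        | cons w t => rfl
  | none =>
    cases (pvSplit browser " ").find? (fun e => PySem.Str.startswith e "Firefox/") with
    | some e =>
      simp only [show (("Firefox/" : String) == "Version/") = false from by decide, Bool.false_eq_true, if_false]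
      cases pvSplit e "/" with
      | nil => rfl
      | cons n rest =>
        cases rest with
        | nil => rfl
        | cons v rest2 =>
          cases rest2 with
          | nil => rfl
          | cons w t => rfl
    | none =>
      cases (pvSplit browser " ").find? (fun e => PySem.Str.startswith e "Chrome/") with
      | some e =>
        simp only [show (("Chrome/" : String) == "Version/") = false from by decide, Bool.false_eq_true, if_false]
        cases pvSplit e "/" with
        | nil => rfl
        | cons n rest =>
          cases rest with
          | nil => rfl
          | cons v rest2 =>
            cases rest2 with
            | nil => rfl
            | cons w t => rfl
      | none =>
        cases (pvSplit browser " ").find? (fun e => PySem.Str.startswith e "Version/") with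
        | some e =>
          simp only [show (("Version/" : String) == "Version/") = true from by decide, if_true]
        | none => rfl

-- ===== VERDICT (by name: the statement is the Claim_ definition above) =====
theorem identify_browser_spec : Claim_equal_identify_browser := by
  intro browser _ _
  unfold Spec_identify_browser
  exact pv_ports_eq browser
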